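-- pv_equiv track=rewrite | github.com/rust17/deep-research | src/deep_research/tools/search.py | normalize_and_limit
-- ===== SOURCE A (Python) =====
-- from typing import Iterator, List, Optional
--
-- MAX_LINE_LENGTH = 2000
--
-- MAX_LINES = 1000
--
-- MAX_TOTAL_CHARS = 3000
--
-- MIN_JOIN_LENGTH = 15
--
-- def normalize_and_limit(text_iterator: Iterator[str]) -> str:
--     """
--     Applies limits to the text extraction:
--     - Max 2000 chars per line (append '...' if exceeded)
--     - Max 1000 lines (non-empty)
--     - Max 3000 total chars (non-empty)
--     - Removes empty lines
--     - Joins lines with <= 15 chars with the next line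
--     """
--     total_chars = 0
--     lines_count = 0
--     result_parts = []
--     pending_buffer = ""
--
--     for chunk in text_iterator:
--         if not chunk:
--             continue
--         for line in chunk.splitlines():
--             line = line.strip()
--             if not line:
--                 continue
--
--             if pending_buffer:
--                 line = f"{pending_buffer} {line}"
--                 pending_buffer = ""
--
--             if len(line) <= MIN_JOIN_LENGTH:
--                 pending_buffer = line
--                 continue
--
--             if lines_count >= MAX_LINES:
--                 return "\n".join(result_parts)
--
--             # Truncate line
--             if len(line) > MAX_LINE_LENGTH:
--                 line = line[:MAX_LINE_LENGTH] + "..."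
--
--             # Check total chars
--             if total_chars + len(line) > MAX_TOTAL_CHARS:
--                 remaining = MAX_TOTAL_CHARS - total_chars
--                 if remaining > 0:
--                     result_parts.append(line[:remaining])
--                 return "\n".join(result_parts)
--
--             result_parts.append(line)
--             total_chars += len(line)
--             lines_count += 1
--
--     # Handle any remaining content in buffer
--     if pending_buffer and lines_count < MAX_LINES:
--         if total_chars + len(pending_buffer) <= MAX_TOTAL_CHARS:
--             result_parts.append(pending_buffer)
--
--     return "\n".join(result_parts)
-- ===== SOURCE B (Python) =====
-- MAX_LINE_LENGTH = 2000
-- MAX_LINES = 1000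
-- MAX_TOTAL_CHARS = 3000
-- MIN_JOIN_LENGTH = 15
--
--
-- def normalize_and_limit(text_iterator):
--     """Staged whole-stream pipeline instead of A's single streaming loop
--     with interleaved early returns."""
--     # Stage 1: flatten the stream into stripped, non-empty lines.
--     lines = [s for chunk in text_iterator for raw in chunk.splitlines()
--              if (s := raw.strip())]
--
--     # Stage 2: coalesce runs of short lines; collect the long lines.
--     longs, buf = [], ""
--     for s in lines:
--         s = buf + " " + s if buf else s
--         if len(s) <= MIN_JOIN_LENGTH:
--             buf = s
--         else:
--             longs.append(s)
--             buf = ""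
--
--     # Stage 3: cap the number of lines, truncating overlong ones.
--     capped = [t[:MAX_LINE_LENGTH] + "..." if len(t) > MAX_LINE_LENGTH else t
--               for t in longs[:MAX_LINES]]
--
--     # Stage 4: cut the list at the total character budget.
--     parts, total, overflow = [], 0, False
--     for t in capped:
--         if total + len(t) > MAX_TOTAL_CHARS:
--             if MAX_TOTAL_CHARS - total > 0:
--                 parts.append(t[:MAX_TOTAL_CHARS - total])
--             overflow = True
--             break
--         parts.append(t)
--         total += len(t)
--
--     # Stage 5: the leftover short-line buffer goes in whole or not at all.
--     if buf and len(longs) < MAX_LINES and not overflow \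
--             and total + len(buf) <= MAX_TOTAL_CHARS:
--         parts.append(buf)
--     return "\n".join(parts)
-- ===== Notes on version B (the rewrite author's own statement) =====
-- stated objective: alternative
-- what changed: Replaces A's single streaming loop with interleaved limit checks and early returns by a staged whole-stream pipeline: strip/filter all lines, one fold coalescing short lines, slice the long-line list at MAX_LINES and truncate each, then a separate scan cutting at the character budget, and finally the leftover buffer.
import Mathlib
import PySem

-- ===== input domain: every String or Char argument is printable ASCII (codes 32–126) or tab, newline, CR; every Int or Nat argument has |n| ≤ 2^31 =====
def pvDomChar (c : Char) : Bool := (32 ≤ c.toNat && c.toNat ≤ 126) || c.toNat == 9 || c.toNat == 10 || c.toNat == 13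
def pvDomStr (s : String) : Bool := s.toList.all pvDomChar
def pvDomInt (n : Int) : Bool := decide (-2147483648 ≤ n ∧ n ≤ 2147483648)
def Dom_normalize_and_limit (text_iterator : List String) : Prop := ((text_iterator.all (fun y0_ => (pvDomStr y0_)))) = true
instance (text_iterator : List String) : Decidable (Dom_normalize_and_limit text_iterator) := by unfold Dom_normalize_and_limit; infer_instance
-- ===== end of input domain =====

-- B replaces A's single streaming loop (interleaved limits, early returns) by a staged
-- whole-stream pipeline: strip/filter, coalesce, cap+truncate, character-budget cut, buffer.

-- ===== PORT A =====
-- State of A's loop: (total_chars, lines_count, result_parts, pending_buffer).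
-- Early 'return' inside the loops is modelled by Sum.inl (the returned string).
def stepA (st : Int × Int × List String × String) (raw : String) :
    Sum String (Int × Int × List String × String) :=
  match st with
  | (total, count, parts, pending) =>
    let line := PySem.Str.strip raw
    if line = "" then .inr (total, count, parts, pending)
    else
      let line := if pending ≠ "" then pending ++ " " ++ line else line
      if PySem.Str.len line ≤ 15 then .inr (total, count, parts, line)
      else if count ≥ 1000 then .inl (PySem.Str.join "\n" parts)
      else
        let line := if PySem.Str.len line > 2000 then
            PySem.Str.slice line none (some 2000) ++ "..." else line
        if total + PySem.Str.len line > 3000 then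
          .inl (PySem.Str.join "\n"
            (if 3000 - total > 0 then
              parts ++ [PySem.Str.slice line none (some (3000 - total))] else parts))
        else .inr (total + PySem.Str.len line, count + 1, parts ++ [line], "")

def runLinesA : List String → (Int × Int × List String × String) →
    Sum String (Int × Int × List String × String)
  | [], st => .inr st
  | raw :: rest, st =>
    match stepA st raw with
    | .inl r => .inl r
    | .inr st' => runLinesA rest st'

def runChunksA : List String → (Int × Int × List String × String) →
    Sum String (Int × Int × List String × String)
  | [], st => .inr st
  | ch :: rest, st =>
    if ch = "" then runChunksA rest st
    else
      match runLinesA (PySem.Str.splitlines ch) st with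
      | .inl r => .inl r
      | .inr st' => runChunksA rest st'

def finishA : Sum String (Int × Int × List String × String) → String
  | .inl r => r
  | .inr (total, count, parts, pending) =>
    if pending ≠ "" ∧ count < 1000 then
      if total + PySem.Str.len pending ≤ 3000 then
        PySem.Str.join "\n" (parts ++ [pending])
      else PySem.Str.join "\n" parts
    else PySem.Str.join "\n" parts

def normalize_and_limit (text_iterator : List String) : String :=
  finishA (runChunksA text_iterator (0, 0, [], ""))

-- ===== PORT B =====
-- Stage 1: flatten the chunk stream into stripped, non-empty lines.
def stripLinesB (text_iterator : List String) : List String :=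
  (text_iterator.flatMap PySem.Str.splitlines).filterMap
    (fun raw => let s := PySem.Str.strip raw; if s = "" then none else some s)

-- Stage 2: one fold coalescing runs of short lines; collects the long lines.
def coalStep (st : List String × String) (s : String) : List String × String :=
  let s := if st.2 ≠ "" then st.2 ++ " " ++ s else s
  if PySem.Str.len s ≤ 15 then (st.1, s) else (st.1 ++ [s], "")

def coalesceB (lines : List String) : List String × String :=
  lines.foldl coalStep ([], "")

-- Stage 3 helper: per-line truncation (Source B's conditional expression).
def truncB (text : String) : String :=
  if PySem.Str.len text > 2000 then PySem.Str.slice text none (some 2000) ++ "..." else text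

-- Stage 4: cut the capped list at the total character budget: (parts, total, overflow).
def budgetB : List String → Int → List String × Int × Bool
  | [], total => ([], total, false)
  | t :: rest, total =>
    if total + PySem.Str.len t > 3000 then
      ((if 3000 - total > 0 then [PySem.Str.slice t none (some (3000 - total))] else []),
       total, true)
    else
      let r := budgetB rest (total + PySem.Str.len t)
      (t :: r.1, r.2)

def normalize_and_limit_alt (text_iterator : List String) : String :=
  let lb := coalesceB (stripLinesB text_iterator)
  let capped := (PySem.List.slice lb.1 none (some 1000)).map truncB
  let r := budgetB capped 0
  let parts :=
    if lb.2 ≠ "" ∧ lb.1.length < 1000 ∧ r.2.2 = false ∧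
        r.2.1 + PySem.Str.len lb.2 ≤ 3000
    then r.1 ++ [lb.2] else r.1
  PySem.Str.join "\n" parts

-- ===== PRECONDITION & SPEC =====
def Spec_normalize_and_limit (text_iterator : List String) (out : String) : Prop := out = normalize_and_limit_alt text_iterator
instance (text_iterator : List String) (out : String) : Decidable (Spec_normalize_and_limit text_iterator out) := by unfold Spec_normalize_and_limit; infer_instance

-- ===== CLAIM (what is proved, stated in full; the proofs are below) =====
def Claim_equal_normalize_and_limit : Prop := ∀ (text_iterator : List String), Dom_normalize_and_limit text_iterator → Spec_normalize_and_limit text_iterator (normalize_and_limit text_iterator)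

-- ===== LEMMAS AND PROOFS =====

-- A runs over the flattened line stream.
lemma runLinesA_append (xs ys : List String) (st : Int × Int × List String × String) :
    runLinesA (xs ++ ys) st =
      match runLinesA xs st with
      | .inl r => .inl r
      | .inr st' => runLinesA ys st' := by
  induction xs generalizing st with
  | nil => simp [runLinesA]
  | cons raw rest ih =>
    simp only [List.cons_append, runLinesA]
    cases stepA st raw with
    | inl r => rfl
    | inr st' => exact ih st'

lemma splitlines_empty : PySem.Str.splitlines "" = [] := by decide

lemma runChunksA_flat (chunks : List String) (st : Int × Int × List String × String) :
    runChunksA chunks st = runLinesA (chunks.flatMap PySem.Str.splitlines) st := by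
  induction chunks generalizing st with
  | nil => rfl
  | cons ch rest ih =>
    simp only [runChunksA, List.flatMap_cons, runLinesA_append]
    by_cases h : ch = ""
    · subst h
      simp [splitlines_empty, runLinesA, ih]
    · simp only [if_neg h]
      cases runLinesA (PySem.Str.splitlines ch) st with
      | inl r => rfl
      | inr st' => exact ih st'

-- Proof-side staged intermediates.
def stripF (lines : List String) : List String :=
  lines.filterMap (fun raw => let s := PySem.Str.strip raw; if s = "" then none else some s)

def coalRec : List String → String → List String × String
  | [], buf => ([], buf)
  | s :: rest, buf =>
    let L := if buf ≠ "" then buf ++ " " ++ s else s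
    if PySem.Str.len L ≤ 15 then coalRec rest L
    else (L :: (coalRec rest "").1, (coalRec rest "").2)

structure LG where
  parts : List String
  total : Int
  count : Int
  ov : Bool
  hc : Bool
deriving DecidableEq, Repr

-- A's limit processing of the long lines, with count offset c and running total t.
def limitGen : List String → Int → Int → LG
  | [], t, c => ⟨[], t, c, false, false⟩
  | L :: rest, t, c =>
    if c ≥ 1000 then ⟨[], t, c, false, true⟩
    else if t + PySem.Str.len (truncB L) > 3000 then
      ⟨if 3000 - t > 0 then [PySem.Str.slice (truncB L) none (some (3000 - t))] else [],
       t, c, true, false⟩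
    else
      let r := limitGen rest (t + PySem.Str.len (truncB L)) (c + 1)
      ⟨truncB L :: r.parts, r.total, r.count, r.ov, r.hc⟩

def assembleG (lb : List String × String) (t c : Int) (parts : List String) : List String :=
  let r := limitGen lb.1 t c
  if lb.2 ≠ "" ∧ r.ov = false ∧ r.hc = false ∧ r.count < 1000 ∧
      r.total + PySem.Str.len lb.2 ≤ 3000
  then parts ++ r.parts ++ [lb.2] else parts ++ r.parts

lemma truncB_eq (s : String) :
    truncB s = if PySem.Str.len s > 2000 then
      PySem.Str.slice s none (some 2000) ++ "..." else s := rfl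

-- A's whole run equals the staged pipeline, generalized over the loop state.
lemma keyA (lines : List String) :
    ∀ (t c : Int) (parts : List String) (p : String),
      finishA (runLinesA lines (t, c, parts, p)) =
        PySem.Str.join "\n" (assembleG (coalRec (stripF lines) p) t c parts) := by
  induction lines with
  | nil =>
    intro t c parts p
    simp only [runLinesA, finishA, stripF, List.filterMap_nil, coalRec, assembleG, limitGen]
    split_ifs <;> simp_all
    omega
  | cons raw rest ih =>
    intro t c parts p
    simp only [runLinesA, stepA, stripF, List.filterMap_cons]
    by_cases h1 : PySem.Str.strip raw = ""
    · simp only [if_pos h1]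
      exact ih t c parts p
    · simp only [if_neg h1, ← truncB_eq]
      set L := if p ≠ "" then p ++ " " ++ PySem.Str.strip raw else PySem.Str.strip raw with hL
      show finishA _ = PySem.Str.join "\n"
        (assembleG (coalRec (PySem.Str.strip raw :: stripF rest) p) t c parts)
      have hcr : coalRec (PySem.Str.strip raw :: stripF rest) p =
          if PySem.Str.len L ≤ 15 then coalRec (stripF rest) L
          else (L :: (coalRec (stripF rest) "").1, (coalRec (stripF rest) "").2) := by
        simp only [coalRec, hL]
      rw [hcr]
      by_cases h2 : PySem.Str.len L ≤ 15
      · simp only [if_pos h2]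
        exact ih t c parts L
      · simp only [if_neg (by omega : ¬ PySem.Str.len L ≤ 15)]
        by_cases h3 : c ≥ 1000
        · simp only [finishA, assembleG, limitGen, if_pos h3]
          simp
        · simp only [if_neg h3]
          by_cases h4 : t + PySem.Str.len (truncB L) > 3000
          · simp only [finishA, assembleG, limitGen, if_neg h3, if_pos h4]
            split <;> simp
          · simp only [if_neg h4]
            rw [ih (t + PySem.Str.len (truncB L)) (c + 1) (parts ++ [truncB L]) ""]
            simp only [assembleG, limitGen, if_neg h3, if_neg h4]
            split <;> simp
-- B's fold is coalRec with an accumulator.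
lemma coal_foldl (lines : List String) :
    ∀ (acc : List String) (buf : String),
      lines.foldl coalStep (acc, buf) =
        (acc ++ (coalRec lines buf).1, (coalRec lines buf).2) := by
  induction lines with
  | nil => intro acc buf; simp [coalRec]
  | cons s rest ih =>
    intro acc buf
    simp only [List.foldl_cons, coalStep, coalRec]
    by_cases h : PySem.Str.len (if buf ≠ "" then buf ++ " " ++ s else s) ≤ 15
    · simp only [if_pos h]
      exact ih acc _
    · simp only [if_neg h]
      rw [ih]
      simp

-- limitGen against B's take/map/budget stages.
lemma limitGen_staged (longs : List String) :
    ∀ (t c : Int), 0 ≤ c → c ≤ 1000 →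
      (limitGen longs t c).parts =
          (budgetB ((longs.take (1000 - c).toNat).map truncB) t).1 ∧
      (limitGen longs t c).total =
          (budgetB ((longs.take (1000 - c).toNat).map truncB) t).2.1 ∧
      (limitGen longs t c).ov =
          (budgetB ((longs.take (1000 - c).toNat).map truncB) t).2.2 ∧
      ((limitGen longs t c).ov = false →
        (((limitGen longs t c).hc = false ∧ (limitGen longs t c).count < 1000) ↔
          c + (longs.length : Int) < 1000)) := by
  induction longs with
  | nil =>
    intro t c h0 h1
    refine ⟨?_, ?_, ?_, fun _ => ?_⟩
    all_goals simp [limitGen, budgetB]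
  | cons L rest ih =>
    intro t c h0 h1
    by_cases hc : c ≥ 1000
    · have hn : (1000 - c).toNat = 0 := by omega
      rw [hn]
      refine ⟨?_, ?_, ?_, fun _ => ?_⟩
      all_goals simp [limitGen, if_pos hc, budgetB]
      omega
    · have hn : (1000 - c).toNat = ((1000 - (c+1)).toNat) + 1 := by omega
      rw [hn]
      simp only [limitGen, if_neg hc, List.take_succ_cons, List.map_cons, budgetB]
      by_cases h4 : t + PySem.Str.len (truncB L) > 3000
      · simp only [if_pos h4]
        refine ⟨?_, ?_, ?_, fun h => ?_⟩
        all_goals simp_all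
      · simp only [if_neg h4]
        obtain ⟨e1, e2, e3, e4⟩ := ih (t + PySem.Str.len (truncB L)) (c + 1) (by omega) (by omega)
        refine ⟨?_, ?_, ?_, fun hov => ?_⟩
        · rw [e1]
        · exact e2
        · exact e3
        · rw [e4 hov]
          simp only [List.length_cons]
          push_cast
          omega

lemma slice_take_1000 (xs : List String) :
    PySem.List.slice xs none (some 1000) = xs.take 1000 := by
  rw [PySem.List.slice_to xs (by norm_num)]
  rfl

lemma assembleG_alt (lb : List String × String) :
    PySem.Str.join "\n" (assembleG lb 0 0 []) =
      (let capped := (PySem.List.slice lb.1 none (some 1000)).map truncB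
       let r := budgetB capped 0
       let parts :=
         if lb.2 ≠ "" ∧ lb.1.length < 1000 ∧ r.2.2 = false ∧
             r.2.1 + PySem.Str.len lb.2 ≤ 3000
         then r.1 ++ [lb.2] else r.1
       PySem.Str.join "\n" parts) := by
  obtain ⟨e1, e2, e3, e4⟩ := limitGen_staged lb.1 0 0 (by norm_num) (by norm_num)
  have hn : ((1000 : Int) - 0).toNat = 1000 := rfl
  rw [hn] at e1 e2 e3
  simp only [assembleG, slice_take_1000, List.nil_append]
  by_cases hov : (limitGen lb.1 0 0).ov = false
  · have hiff := e4 hov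
    by_cases hbuf : lb.2 = ""
    · simp [hbuf, e1]
    · by_cases hlen : lb.1.length < 1000
      · have hcnt : (limitGen lb.1 0 0).hc = false ∧ (limitGen lb.1 0 0).count < 1000 := by
          rw [hiff]; omega
        by_cases hbud : (limitGen lb.1 0 0).total + PySem.Str.len lb.2 ≤ 3000
        · rw [if_pos ⟨hbuf, hov, hcnt.1, hcnt.2, hbud⟩,
              if_pos ⟨hbuf, hlen, by rw [← e3]; exact hov, by rw [← e2]; exact hbud⟩]
          simp [e1]
        · rw [if_neg (fun h => hbud h.2.2.2.2),
              if_neg (fun h => hbud (by rw [e2]; exact h.2.2.2))]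
          simp [e1]
      · have hni : ¬ ((limitGen lb.1 0 0).hc = false ∧ (limitGen lb.1 0 0).count < 1000) := by
          rw [hiff]; omega
        rw [if_neg (fun h => hni ⟨h.2.2.1, h.2.2.2.1⟩), if_neg (fun h => hlen h.2.1)]
        simp [e1]
  · have hov' : (limitGen lb.1 0 0).ov = true := by
      revert hov; cases (limitGen lb.1 0 0).ov <;> simp
    rw [if_neg (fun h => by rw [hov'] at h; exact absurd h.2.1 (by simp)),
        if_neg (fun h => hov (by rw [e3]; exact h.2.2.1))]
    simp [e1]

lemma alt_eq (ti : List String) :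
    normalize_and_limit_alt ti =
      PySem.Str.join "\n" (assembleG (coalesceB (stripLinesB ti)) 0 0 []) :=
  (assembleG_alt (coalesceB (stripLinesB ti))).symm

lemma coal_eq (ti : List String) :
    coalesceB (stripLinesB ti) = coalRec (stripF (ti.flatMap PySem.Str.splitlines)) "" := by
  unfold coalesceB
  rw [show stripLinesB ti = stripF (ti.flatMap PySem.Str.splitlines) from rfl]
  rw [coal_foldl]
  simp

-- ===== VERDICT (by name: the statement is the Claim_ definition above) =====
theorem normalize_and_limit_spec : Claim_equal_normalize_and_limit := by
  intro ti _
  unfold Spec_normalize_and_limit normalize_and_limit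
  rw [runChunksA_flat, keyA _ 0 0 [] "", alt_eq, coal_eq]
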